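-- pv_equiv track=rewrite | github.com/dpaleino/new-osm-stats | helpers.py | key_wildcard
-- ===== SOURCE A (Python) =====
-- def key_wildcard(key, ret=None):
--     if not ret:
--         ret = [key]
--     if key[-2:] != ':*':
--         ret.append(key+':*')
--     if ":" in key:
--         partial = key.split(':')[:-1]
--         ret.append(':'.join(partial + ['*']))
--         key_wildcard(':'.join(partial), ret)
--     return set(ret)
-- ===== SOURCE B (Python) =====
-- def key_wildcard(key, ret=None):
--     if not ret:
--         ret = [key]
--     segs = key.split(':')
--     for i in range(len(segs), 0, -1):
--         p = ':'.join(segs[:i])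
--         if not p.endswith(':*'):
--             ret.append(p + ':*')
--         if i > 1:
--             ret.append(':'.join(segs[:i - 1]) + ':*')
--     return set(ret)
-- ===== Notes on version B (the rewrite author's own statement) =====
-- stated objective: alternative
-- what changed: Replaces A's recursion (which re-splits the shrinking key at every level) with a single split of the key into segments followed by one non-recursive loop over prefix lengths that joins segments to build each wildcard; same mutable-ret preamble and append order.
import Mathlib
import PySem

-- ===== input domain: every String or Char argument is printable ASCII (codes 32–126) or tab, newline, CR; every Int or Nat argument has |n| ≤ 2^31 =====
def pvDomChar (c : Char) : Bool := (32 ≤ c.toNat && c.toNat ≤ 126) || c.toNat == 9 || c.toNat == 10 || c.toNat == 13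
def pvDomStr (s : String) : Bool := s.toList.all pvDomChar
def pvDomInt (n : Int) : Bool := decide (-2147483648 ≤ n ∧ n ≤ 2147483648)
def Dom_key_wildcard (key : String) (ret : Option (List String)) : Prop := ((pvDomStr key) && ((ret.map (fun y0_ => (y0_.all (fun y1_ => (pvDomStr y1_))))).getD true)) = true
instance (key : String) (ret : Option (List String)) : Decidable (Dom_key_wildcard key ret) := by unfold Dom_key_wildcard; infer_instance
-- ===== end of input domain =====

-- B replaces A's recursion (which re-splits the shrinking key at every level) by one split of the
-- key into segments and a single non-recursive loop over prefix lengths (objective: alternative).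
-- Both A and B mutate a caller-supplied truthy `ret` list identically; the theorems below are
-- about the returned value.

-- ===== PORT A =====
-- if key[-2:] != ':*': ret.append(key + ':*')
def kwCheck (key : String) (ret : List String) : List String :=
  if PySem.Str.slice key (some (-2)) none ≠ ":*" then ret ++ [key ++ ":*"] else ret

-- A's recursion depth is (number of ':' in key) + 1 ≤ |key| + 1, so the fuel
-- `key.toList.length + 1` is always sufficient; it only makes the literal recursion structural.
def kwGo (fuel : Nat) (key : String) (ret : List String) : List String :=
  match fuel with
  | 0 => ret
  | fuel + 1 =>
    -- if ":" in key:  partial = key.split(':')[:-1]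
    --   ret.append(':'.join(partial + ['*'])); key_wildcard(':'.join(partial), ret)
    -- (sep ":" is non-empty, so split? never returns none)
    if PySem.Str.isIn ":" key then
      kwGo fuel
        (PySem.Str.join ":" (PySem.List.slice ((PySem.Str.split? key ":").getD []) none (some (-1))))
        (kwCheck key ret ++
          [PySem.Str.join ":" ((PySem.List.slice ((PySem.Str.split? key ":").getD []) none (some (-1))) ++ ["*"])])
    else kwCheck key ret

def key_wildcard (key : String) (ret : Option (List String)) : List String :=
  -- if not ret: ret = [key]
  PySem.Set.ofList (kwGo (key.toList.length + 1) key
    (match ret with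
     | none => [key]
     | some r => if r.isEmpty then [key] else r))

-- ===== PORT B =====
-- if not p.endswith(':*'): ret.append(p + ':*')
def kwStep (p : String) (acc : List String) : List String :=
  if !(PySem.Str.endswith p ":*") then acc ++ [p ++ ":*"] else acc

-- body of B's for-loop over i in range(len(segs), 0, -1), with p = ':'.join(segs[:i]) inlined
def kwBody (segs : List String) (acc : List String) (i : Int) : List String :=
  if 1 < i then
    kwStep (PySem.Str.join ":" (PySem.List.slice segs none (some i))) acc ++
      [PySem.Str.join ":" (PySem.List.slice segs none (some (i - 1))) ++ ":*"]
  else kwStep (PySem.Str.join ":" (PySem.List.slice segs none (some i))) acc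

def key_wildcard_alt (key : String) (ret : Option (List String)) : List String :=
  -- if not ret: ret = [key]  ;  segs = key.split(':')  (sep ":" non-empty, split? never none)
  PySem.Set.ofList
    ((PySem.List.pyRange ((((PySem.Str.split? key ":").getD []).length : Int)) 0 (-1)).foldl
      (kwBody ((PySem.Str.split? key ":").getD []))
      (match ret with
       | none => [key]
       | some r => if r.isEmpty then [key] else r))

-- ===== PRECONDITION & SPEC =====
def Spec_key_wildcard (key : String) (ret : Option (List String)) (out : List String) : Prop := out = key_wildcard_alt key ret
instance (key : String) (ret : Option (List String)) (out : List String) : Decidable (Spec_key_wildcard key ret out) := by unfold Spec_key_wildcard; infer_instance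

-- ===== CLAIM (what is proved, stated in full; the proofs are below) =====
def Claim_equal_key_wildcard : Prop := ∀ (key : String) (ret : Option (List String)), Dom_key_wildcard key ret → Spec_key_wildcard key ret (key_wildcard key ret)

-- ===== LEMMAS AND PROOFS =====

-- A functional model of PySem.Chars.splitOn for a single-character separator.
def splitC (c : Char) (pre : List Char) : List Char → List (List Char)
  | [] => [pre]
  | d :: rest => if c = d then pre :: splitC c [] rest else splitC c (pre ++ [d]) rest

theorem go_step (c d : Char) (f : Nat) (rest cur : List Char) (acc : List (List Char)) :
    PySem.Chars.splitOn.go [c] (f + 1) (d :: rest) cur acc =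
      if c = d then PySem.Chars.splitOn.go [c] f rest [] (cur.reverse :: acc)
      else PySem.Chars.splitOn.go [c] f rest (d :: cur) acc := by
  simp only [PySem.Chars.splitOn.go]
  by_cases h : c = d <;> simp [List.isPrefixOf, h]

theorem go_eq_splitC (c : Char) : ∀ (fuel : Nat) (l cur : List Char) (acc : List (List Char)),
    l.length < fuel →
    PySem.Chars.splitOn.go [c] fuel l cur acc = acc.reverse ++ splitC c cur.reverse l := by
  intro fuel
  induction fuel with
  | zero => intro l cur acc h; omega
  | succ f ih =>
    intro l cur acc h
    cases l with
    | nil => simp [PySem.Chars.splitOn.go, splitC]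
    | cons d rest =>
      rw [go_step]
      by_cases hc : c = d
      · rw [if_pos hc, ih rest [] (cur.reverse :: acc) (by simp at h; omega)]
        simp [splitC, hc]
      · rw [if_neg hc, ih rest (d :: cur) acc (by simp at h; omega)]
        simp [splitC, hc]

theorem splitOn_eq_splitC (c : Char) (s : List Char) :
    PySem.Chars.splitOn s [c] = splitC c [] s := by
  unfold PySem.Chars.splitOn
  simpa using go_eq_splitC c (s.length + 1) s [] [] (by omega)

theorem splitC_ne_nil (c : Char) : ∀ (s pre : List Char), splitC c pre s ≠ [] := by
  intro s
  induction s with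
  | nil => intro pre; simp [splitC]
  | cons d rest ih =>
    intro pre
    by_cases hc : c = d <;> simp [splitC, hc] <;> apply ih

theorem length_splitC (c : Char) : ∀ (s pre : List Char), (splitC c pre s).length ≤ s.length + 1 := by
  intro s
  induction s with
  | nil => intro pre; simp [splitC]
  | cons d rest ih =>
    intro pre
    by_cases hc : c = d
    · simp only [splitC, if_pos hc, List.length_cons]
      have := ih []; omega
    · simp only [splitC, if_neg hc, List.length_cons]
      have := ih (pre ++ [d]); omega

theorem join_splitC (c : Char) : ∀ (s pre : List Char),
    PySem.Chars.join [c] (splitC c pre s) = pre ++ s := by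
  intro s
  induction s with
  | nil => intro pre; simp [splitC, PySem.Chars.join_singleton]
  | cons d rest ih =>
    intro pre
    by_cases hc : c = d
    · simp only [splitC, if_pos hc]
      obtain ⟨q, t, hq⟩ : ∃ q t, splitC c [] rest = q :: t := by
        cases hqt : splitC c [] rest with
        | nil => exact absurd hqt (splitC_ne_nil c rest [])
        | cons q t => exact ⟨q, t, rfl⟩
      rw [hq, PySem.Chars.join_cons_cons, ← hq, ih []]
      simp [hc]
    · simp only [splitC, if_neg hc]
      rw [ih (pre ++ [d])]; simp

theorem mem_splitC_not_mem (c : Char) : ∀ (s pre : List Char), c ∉ pre →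
    ∀ x ∈ splitC c pre s, c ∉ x := by
  intro s
  induction s with
  | nil => intro pre hp x hx; simp [splitC] at hx; subst hx; exact hp
  | cons d rest ih =>
    intro pre hp x hx
    by_cases hc : c = d
    · simp only [splitC, if_pos hc, List.mem_cons] at hx
      rcases hx with rfl | hx
      · exact hp
      · exact ih [] (by simp) x hx
    · simp only [splitC, if_neg hc] at hx
      refine ih (pre ++ [d]) ?_ x hx
      simp only [List.mem_append, List.mem_singleton]
      rintro (h | h)
      · exact hp h
      · exact hc (h ▸ rfl)

theorem splitC_no_sep (c : Char) : ∀ (s pre : List Char), c ∉ s → splitC c pre s = [pre ++ s] := by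
  intro s
  induction s with
  | nil => intro pre _; simp [splitC]
  | cons d rest ih =>
    intro pre h
    have hc : c ≠ d := by intro hh; exact h (by simp [hh])
    simp only [splitC, if_neg hc]
    rw [ih (pre ++ [d]) (by intro hh; exact h (by simp [hh]))]
    simp

theorem splitC_append_sep (c : Char) : ∀ (seg : List Char), c ∉ seg → ∀ (t pre : List Char),
    splitC c pre (seg ++ c :: t) = (pre ++ seg) :: splitC c [] t := by
  intro seg
  induction seg with
  | nil => intro _ t pre; simp [splitC]
  | cons d rest ih =>
    intro h t pre
    have hc : c ≠ d := by intro hh; exact h (by simp [hh])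
    simp only [List.cons_append, splitC, if_neg hc]
    rw [ih (by intro hh; exact h (by simp [hh])) t (pre ++ [d])]
    simp

theorem splitC_join (c : Char) : ∀ (segs : List (List Char)), segs ≠ [] →
    (∀ x ∈ segs, c ∉ x) → splitC c [] (PySem.Chars.join [c] segs) = segs := by
  intro segs
  induction segs with
  | nil => intro h; exact absurd rfl h
  | cons a rest ih =>
    intro _ hfree
    cases rest with
    | nil =>
      rw [PySem.Chars.join_singleton]
      simpa using splitC_no_sep c a [] (hfree a (by simp))
    | cons b r =>
      rw [PySem.Chars.join_cons_cons]
      have h1 : a ++ [c] ++ PySem.Chars.join [c] (b :: r) = a ++ c :: PySem.Chars.join [c] (b :: r) := by simp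
      rw [h1, splitC_append_sep c a (hfree a (by simp))]
      rw [ih (by simp) (fun x hx => hfree x (by simp [hx]))]
      simp

-- ---- string-level bridges ----

theorem toList_colon : (":" : String).toList = [':'] := rfl
theorem toList_star_pair : (":*" : String).toList = [':', '*'] := rfl

theorem string_eq_iff_toList (a b : String) : a = b ↔ a.toList = b.toList := by
  constructor
  · intro h; rw [h]
  · intro h; rw [← String.ofList_toList (s := a), h, String.ofList_toList]

theorem split_colon_eq (key : String) :
    (PySem.Str.split? key ":").getD [] = (splitC ':' [] key.toList).map String.ofList := by
  unfold PySem.Str.split? PySem.Chars.split?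
  simp [toList_colon, splitOn_eq_splitC]

theorem toList_join_colon (l : List String) :
    (PySem.Str.join ":" l).toList = PySem.Chars.join [':'] (l.map String.toList) := by
  rw [PySem.Str.toList_join, toList_colon]

-- `':'.join(l + ['*']) = ':'.join(l) + ':*'` for non-empty l
theorem chars_join_append_star (c : Char) (x : List Char) :
    ∀ (L : List (List Char)), L ≠ [] →
    PySem.Chars.join [c] (L ++ [x]) = PySem.Chars.join [c] L ++ c :: x := by
  intro L
  induction L with
  | nil => intro h; exact absurd rfl h
  | cons a rest ih =>
    intro _
    cases rest with
    | nil => simp [PySem.Chars.join_cons_cons, PySem.Chars.join_singleton]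
    | cons b r =>
      have h1 : (a :: b :: r) ++ [x] = a :: ((b :: r) ++ [x]) := by simp
      rw [h1]
      obtain ⟨q, t, hq⟩ : ∃ q t, (b :: r) ++ [x] = q :: t := ⟨b, r ++ [x], by simp⟩
      rw [hq, PySem.Chars.join_cons_cons, ← hq, ih (by simp), PySem.Chars.join_cons_cons]
      simp

theorem join_append_star (l : List String) (h : l ≠ []) :
    PySem.Str.join ":" (l ++ ["*"]) = PySem.Str.join ":" l ++ ":*" := by
  rw [string_eq_iff_toList, String.toList_append, toList_join_colon, toList_join_colon,
    toList_star_pair, List.map_append]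
  have h2 : (["*"] : List String).map String.toList = [['*']] := rfl
  rw [h2, chars_join_append_star ':' ['*'] (l.map String.toList) (by simpa using h)]

-- A's `key[-2:] == ':*'` coincides with B's `key.endswith(':*')`
theorem slice_cond_iff (s : String) :
    (PySem.Str.slice s (some (-2)) none = ":*") ↔ (PySem.Str.endswith s ":*" = true) := by
  rw [string_eq_iff_toList, PySem.Str.toList_slice, toList_star_pair, PySem.Str.endswith_eq,
    toList_star_pair, PySem.Chars.endswith_iff, PySem.Chars.slice_eq_listSlice]
  generalize s.toList = L
  simp only [PySem.List.slice, PySem.List.clampIdx]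
  by_cases hl : L.length < 2
  · have hc : ((L.length : Int) + -2 < 0) := by omega
    simp only [if_pos (by norm_num : (-2 : Int) < 0), if_pos hc]
    constructor
    · intro hh
      have : L.length = 2 := by rw [show L = [':', '*'] from by simpa using hh]; rfl
      omega
    · intro hh
      have := hh.length_le
      simp at this; omega
  · have hc : ¬ ((L.length : Int) + -2 < 0) := by omega
    simp only [if_pos (by norm_num : (-2 : Int) < 0), if_neg hc]
    have ha : ((L.length : Int) + -2).toNat = L.length - 2 := by omega
    rw [ha]
    have hb : L.length - (L.length - 2) = 2 := by omega
    rw [hb]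
    have hlen : (L.drop (L.length - 2)).length = 2 := by simp; omega
    rw [List.take_of_length_le (by omega)]
    constructor
    · intro hh
      exact ⟨L.take (L.length - 2), by rw [← hh]; exact List.take_append_drop _ L⟩
    · rintro ⟨t, ht⟩
      subst ht
      have hlt : (t ++ [':', '*']).length - 2 = t.length := by simp
      rw [hlt, List.drop_left]

-- `':' in ':'.join(segs)` iff there are at least two segments (segments colon-free)
theorem isIn_join_iff (segs : List String) (hne : segs ≠ [])
    (hfree : ∀ x ∈ segs, ':' ∉ x.toList) :
    (PySem.Str.isIn ":" (PySem.Str.join ":" segs) = true) ↔ 2 ≤ segs.length := by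
  rw [show PySem.Str.isIn ":" (PySem.Str.join ":" segs) =
      PySem.Chars.isIn [':'] (PySem.Str.join ":" segs).toList from rfl,
    PySem.Chars.isIn_iff_infix, List.singleton_infix_iff, toList_join_colon]
  cases segs with
  | nil => exact absurd rfl hne
  | cons a rest =>
    cases rest with
    | nil =>
      rw [show (([a] : List String).map String.toList) = [a.toList] from rfl,
        PySem.Chars.join_singleton]
      simp only [List.length_cons, List.length_nil]
      exact ⟨fun hh => absurd hh (hfree a (by simp)), fun hh => by omega⟩
    | cons b r =>
      rw [List.map_cons, List.map_cons, PySem.Chars.join_cons_cons]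
      simp

theorem slice_neg_one {α : Type} (xs : List α) :
    PySem.List.slice xs none (some (-1)) = xs.dropLast := by
  simp only [PySem.List.slice, PySem.List.clampIdx]
  by_cases he : xs = []
  · subst he; simp
  · have hl : 1 ≤ xs.length := List.length_pos_of_ne_nil he
    have hc : ¬ ((xs.length : Int) + -1 < 0) := by omega
    simp only [if_pos (by norm_num : (-1 : Int) < 0), if_neg hc]
    have ha : ((xs.length : Int) + -1).toNat = xs.length - 1 := by omega
    rw [ha, List.drop_zero, List.dropLast_eq_take]
    simp

-- splitting the join of colon-free segments gives the segments back
theorem parts_of_join (segs : List String) (hne : segs ≠ [])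
    (hfree : ∀ x ∈ segs, ':' ∉ x.toList) :
    (PySem.Str.split? (PySem.Str.join ":" segs) ":").getD [] = segs := by
  rw [split_colon_eq, toList_join_colon]
  rw [splitC_join ':' (segs.map String.toList) (by simpa using hne)
    (by intro x hx; obtain ⟨y, hy, rfl⟩ := List.mem_map.mp hx; exact hfree y hy)]
  rw [List.map_map]
  have h1 : (String.ofList ∘ String.toList) = id := by
    funext z; simp [String.ofList_toList]
  rw [h1, List.map_id]

-- the descending index list of B's loop
def downFrom (n : Nat) : List Int := (List.range n).map (fun k : Nat => (n : Int) - (k : Int))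

theorem pyRange_eq_downFrom (n : Nat) :
    PySem.List.pyRange (n : Int) 0 (-1) = downFrom n := by
  rw [PySem.List.pyRange_neg_one]
  unfold downFrom
  have h1 : ((n : Int) - 0).toNat = n := by omega
  rw [h1]

theorem downFrom_succ (n : Nat) : downFrom (n + 1) = ((n : Int) + 1) :: downFrom n := by
  unfold downFrom
  rw [List.range_succ_eq_map, List.map_cons, List.map_map]
  refine congrArg₂ List.cons (by push_cast; ring) ?_
  refine List.map_congr_left ?_
  intro k _
  simp only [Function.comp]
  push_cast
  ring

theorem mem_downFrom (n : Nat) (i : Int) (h : i ∈ downFrom n) : 1 ≤ i ∧ i ≤ n := by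
  unfold downFrom at h
  obtain ⟨k, hk, rfl⟩ := List.mem_map.mp h
  have := List.mem_range.mp hk
  omega

-- A's conditional append equals B's conditional append
theorem kwCheck_eq_kwStep (s : String) (acc : List String) : kwCheck s acc = kwStep s acc := by
  unfold kwCheck kwStep
  by_cases h : PySem.Str.endswith s ":*" = true
  · rw [if_neg (by simpa using (slice_cond_iff s).mpr h), if_neg (by rw [h]; simp)]
  · have hb : PySem.Str.endswith s ":*" = false := by simpa using h
    rw [if_pos (fun hh => h ((slice_cond_iff s).mp hh)), if_pos (by rw [hb]; simp)]

-- B's loop body does not look past index i, so dropping the last segment is invisible for i ≤ len-1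
theorem kwBody_dropLast (segs : List String) (i : Int) (h1 : 1 ≤ i)
    (h2 : i ≤ (segs.length : Int) - 1) (acc : List String) :
    kwBody segs.dropLast acc i = kwBody segs acc i := by
  have e : ∀ j : Int, 0 ≤ j → j ≤ (segs.length : Int) - 1 →
      PySem.List.slice segs.dropLast none (some j) = PySem.List.slice segs none (some j) := by
    intro j hj0 hj1
    rw [PySem.List.slice_to _ hj0, PySem.List.slice_to _ hj0, List.dropLast_eq_take,
      List.take_take]
    congr 1
    omega
  unfold kwBody
  rw [e i (by omega) h2, e (i - 1) (by omega) (by omega)]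

-- ---- the main induction: A's recursion = B's loop, both started at ':'.join(segs) ----

theorem kwGo_eq_fold : ∀ (n : Nat) (segs : List String), segs.length = n → segs ≠ [] →
    (∀ x ∈ segs, ':' ∉ x.toList) → ∀ (ret : List String) (fuel : Nat), n ≤ fuel →
    kwGo fuel (PySem.Str.join ":" segs) ret = (downFrom n).foldl (kwBody segs) ret := by
  intro n
  induction n with
  | zero =>
    intro segs hlen hne
    exact absurd (List.length_eq_zero_iff.mp hlen) hne
  | succ m ih =>
    intro segs hlen hne hfree ret fuel hfuel
    obtain ⟨f, rfl⟩ : ∃ f, fuel = f + 1 := ⟨fuel - 1, by omega⟩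
    have hslice_full : PySem.List.slice segs none (some ((m : Int) + 1)) = segs := by
      rw [PySem.List.slice_to _ (by omega)]
      have h1 : ((m : Int) + 1).toNat = m + 1 := by omega
      rw [h1]
      exact List.take_of_length_le (by omega)
    rw [downFrom_succ, List.foldl_cons]
    cases m with
    | zero =>
      -- a single segment: no colon in the key, both sides stop after the first check
      have hnotin : ¬ (PySem.Str.isIn ":" (PySem.Str.join ":" segs) = true) := by
        rw [isIn_join_iff segs hne hfree]; omega
      simp only [kwGo, if_neg hnotin]
      have hd0 : downFrom 0 = [] := rfl
      rw [hd0, List.foldl_nil]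
      unfold kwBody
      rw [if_neg (by norm_num), hslice_full]
      exact kwCheck_eq_kwStep _ ret
    | succ m' =>
      -- at least two segments: A recurses on ':'.join(segs[:-1])
      have hlen2 : 2 ≤ segs.length := by omega
      have hisin : PySem.Str.isIn ":" (PySem.Str.join ":" segs) = true := by
        rw [isIn_join_iff segs hne hfree]; omega
      simp only [kwGo, if_pos hisin]
      rw [parts_of_join segs hne hfree, slice_neg_one]
      have hdllen : segs.dropLast.length = m' + 1 := by
        rw [List.length_dropLast]; omega
      have hdlne : segs.dropLast ≠ [] := by
        intro hh; rw [hh] at hdllen; simp at hdllen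
      have hdlfree : ∀ x ∈ segs.dropLast, ':' ∉ x.toList :=
        fun x hx => hfree x ((List.dropLast_sublist segs).subset hx)
      rw [ih segs.dropLast hdllen hdlne hdlfree _ f (by omega)]
      -- replace the folded body over the shorter list by the body over segs
      rw [PySem.List.foldl_congr_mem (downFrom (m' + 1)) (kwBody segs.dropLast) (kwBody segs) _
        (fun acc i hi => kwBody_dropLast segs i (mem_downFrom _ i hi).1
          (by have := (mem_downFrom _ i hi).2; omega) acc)]
      -- both accumulators coincide
      have hdrop : PySem.List.slice segs none (some ((m' : Int) + 1 + 1 - 1)) = segs.dropLast := by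
        have h0 : ((m' : Int) + 1 + 1 - 1) = ((m' + 1 : Nat) : Int) := by push_cast; ring
        rw [h0, PySem.List.slice_to _ (by omega), Int.toNat_natCast, List.dropLast_eq_take]
        congr 1
        omega
      have hcast : ((Nat.succ m' : Nat) : Int) + 1 = (m' : Int) + 1 + 1 := by push_cast; ring
      rw [hcast]
      unfold kwBody
      rw [if_pos (by omega), hdrop]
      have hfull' : PySem.List.slice segs none (some ((m' : Int) + 1 + 1)) = segs := by
        rw [show ((m' : Int) + 1 + 1) = (((m' + 1 : Nat) : Int) + 1) from by push_cast; ring]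
        exact hslice_full
      rw [hfull', kwCheck_eq_kwStep, join_append_star segs.dropLast hdlne]

-- ===== VERDICT (by name: the statement is the Claim_ definition above) =====
theorem key_wildcard_spec : Claim_equal_key_wildcard := by
  intro key ret hdom
  clear hdom
  unfold Spec_key_wildcard key_wildcard key_wildcard_alt
  have hne : (PySem.Str.split? key ":").getD [] ≠ [] := by
    rw [split_colon_eq]
    simpa using splitC_ne_nil ':' key.toList []
  have hfree : ∀ x ∈ (PySem.Str.split? key ":").getD [], ':' ∉ x.toList := by
    rw [split_colon_eq]
    intro x hx
    obtain ⟨y, hy, rfl⟩ := List.mem_map.mp hx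
    rw [String.toList_ofList]
    exact mem_splitC_not_mem ':' key.toList [] (by simp) y hy
  have hkey : key = PySem.Str.join ":" ((PySem.Str.split? key ":").getD []) := by
    rw [split_colon_eq, string_eq_iff_toList, toList_join_colon, List.map_map]
    have h1 : (String.toList ∘ String.ofList) = id := by funext z; simp
    rw [h1, List.map_id, join_splitC]
    simp
  have hfuel : ((PySem.Str.split? key ":").getD []).length ≤ key.toList.length + 1 := by
    rw [split_colon_eq, List.length_map]
    exact length_splitC ':' key.toList []
  have hmain := kwGo_eq_fold ((PySem.Str.split? key ":").getD []).length
    ((PySem.Str.split? key ":").getD []) rfl hne hfree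
    (match ret with
     | none => [key]
     | some r => if r.isEmpty then [key] else r)
    (key.toList.length + 1) hfuel
  rw [← hkey] at hmain
  rw [hmain, pyRange_eq_downFrom]
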